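-- pv_equiv track=rewrite | github.com/eroosendahl/resume-portfolio | python-exploratory-data-analysis/utility/Roosendahl_2018ULEDA_Functions.py | time_of_day_to_categorical
-- ===== SOURCE A (Python) =====
-- def time_of_day_to_categorical(time_of_day_series):
--     result = []
--     for entry in time_of_day_series:
--         if entry < 28799:
--             result.append("Morning")
--         elif entry < 57599:
--             result.append("Mid-day")
--         else:
--             result.append("Evening")
--     return result
-- ===== SOURCE B (Python) =====
-- def time_of_day_to_categorical(time_of_day_series):
--     # staged refinement: start with the coarsest label everywhere,
--     # then two overwrite sweeps for progressively earlier times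
--     result = ["Evening"] * len(time_of_day_series)
--     for i, v in enumerate(time_of_day_series):
--         if v < 57599:
--             result[i] = "Mid-day"
--     for i, v in enumerate(time_of_day_series):
--         if v < 28799:
--             result[i] = "Morning"
--     return result
-- ===== Notes on version B (the rewrite author's own statement) =====
-- stated objective: alternative
-- what changed: Replaces the single-pass if/elif cascade with staged refinement: allocate an all-'Evening' result, then two in-place overwrite sweeps (< 57599 -> 'Mid-day', then < 28799 -> 'Morning'); correct because the threshold sets are nested so later sweeps refine earlier labels.
import Mathlib
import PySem

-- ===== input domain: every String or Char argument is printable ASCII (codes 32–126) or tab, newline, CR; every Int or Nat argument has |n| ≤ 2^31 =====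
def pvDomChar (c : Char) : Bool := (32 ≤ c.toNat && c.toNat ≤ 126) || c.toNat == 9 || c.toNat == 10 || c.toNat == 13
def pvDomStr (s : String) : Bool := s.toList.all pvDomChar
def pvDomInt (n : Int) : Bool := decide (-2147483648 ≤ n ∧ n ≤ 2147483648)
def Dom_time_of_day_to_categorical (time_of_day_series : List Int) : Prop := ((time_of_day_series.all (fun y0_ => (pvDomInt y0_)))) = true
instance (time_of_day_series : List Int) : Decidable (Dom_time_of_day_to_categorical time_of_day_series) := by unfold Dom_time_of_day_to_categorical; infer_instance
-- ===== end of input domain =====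

-- B replaces A's single-pass if/elif cascade with staged refinement: an all-"Evening" result
-- overwritten by two index sweeps for the nested thresholds (objective: alternative).
-- ===== PORT A =====
def time_of_day_to_categorical (time_of_day_series : List Int) : List String :=
  time_of_day_series.foldl (fun result entry =>
    if entry < 28799 then result ++ ["Morning"]
    else if entry < 57599 then result ++ ["Mid-day"]
    else result ++ ["Evening"]) []

-- ===== PORT B =====
-- one overwrite sweep: 'for i, v in enumerate(series): if v < thr: result[i] = lbl'
-- (result[i] = x on the always-in-range index i is List.set i)
def pvSweep (thr : Int) (lbl : String) : List Int → Nat → List String → List String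
  | [], _, result => result
  | v :: t, i, result =>
      pvSweep thr lbl t (i + 1) (if v < thr then result.set i lbl else result)

def time_of_day_to_categorical_alt (time_of_day_series : List Int) : List String :=
  let result := List.replicate time_of_day_series.length "Evening"
  let result := pvSweep 57599 "Mid-day" time_of_day_series 0 result
  pvSweep 28799 "Morning" time_of_day_series 0 result

-- ===== PRECONDITION & SPEC =====
def Spec_time_of_day_to_categorical (time_of_day_series : List Int) (out : List String) : Prop := out = time_of_day_to_categorical_alt time_of_day_series
instance (time_of_day_series : List Int) (out : List String) : Decidable (Spec_time_of_day_to_categorical time_of_day_series out) := by unfold Spec_time_of_day_to_categorical; infer_instance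

-- ===== CLAIM (what is proved, stated in full; the proofs are below) =====
def Claim_equal_time_of_day_to_categorical : Prop := ∀ (time_of_day_series : List Int), Dom_time_of_day_to_categorical time_of_day_series → Spec_time_of_day_to_categorical time_of_day_series (time_of_day_to_categorical time_of_day_series)

-- ===== LEMMAS AND PROOFS =====

lemma pv_sweep_eq (thr : Int) (lbl : String) :
    ∀ (s : List Int) (pre r : List String), r.length = s.length →
    pvSweep thr lbl s pre.length (pre ++ r) =
      pre ++ (s.zip r).map (fun p => if p.1 < thr then lbl else p.2) := by
  intro s
  induction s with
  | nil => intro pre r h; simp at h; simp [pvSweep, h]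
  | cons v t ih =>
    intro pre r h
    cases r with
    | nil => simp at h
    | cons a r' =>
      simp only [pvSweep, List.zip_cons_cons, List.map_cons]
      have hset : (if v < thr then (pre ++ a :: r').set pre.length lbl else pre ++ a :: r')
          = pre ++ (if v < thr then lbl else a) :: r' := by
        split_ifs <;> simp [List.set_append_right]
      rw [hset]
      have := ih (pre ++ [(if v < thr then lbl else a)]) r' (by simpa using Nat.succ_injective h)
      simpa [List.append_assoc] using this

lemma pv_foldl (s : List Int) (acc : List String) :
    s.foldl (fun result entry =>
      if entry < 28799 then result ++ ["Morning"]
      else if entry < 57599 then result ++ ["Mid-day"]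
      else result ++ ["Evening"]) acc =
    acc ++ s.map (fun e => if e < 28799 then "Morning" else if e < 57599 then "Mid-day" else "Evening") := by
  induction s generalizing acc with
  | nil => simp
  | cons h t ih =>
    simp only [List.foldl, List.map]
    split_ifs <;> simp [ih]

lemma pv_alt_eq_map (s : List Int) :
    time_of_day_to_categorical_alt s =
      s.map (fun e => if e < 28799 then "Morning" else if e < 57599 then "Mid-day" else "Evening") := by
  unfold time_of_day_to_categorical_alt
  have h1 := pv_sweep_eq 57599 "Mid-day" s [] (List.replicate s.length "Evening") (by simp)
  have h2 := pv_sweep_eq 28799 "Morning" s []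
      ((s.zip (List.replicate s.length "Evening")).map (fun p => if p.1 < 57599 then "Mid-day" else p.2))
      (by simp [List.length_zip])
  simp only [List.length_nil, List.nil_append] at h1 h2
  show pvSweep 28799 "Morning" s 0
      (pvSweep 57599 "Mid-day" s 0 (List.replicate s.length "Evening")) = _
  rw [h1, h2]
  clear h1 h2
  induction s with
  | nil => simp
  | cons v t ih =>
    simp only [List.replicate, List.zip_cons_cons, List.map_cons, List.length_cons]
    by_cases hv : v < 28799
    · simp [hv, show v < (57599:Int) by omega, ih]
    · by_cases hv2 : v < 57599 <;> simp [hv, hv2, ih]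

-- ===== VERDICT (by name: the statement is the Claim_ definition above) =====
theorem time_of_day_to_categorical_spec : Claim_equal_time_of_day_to_categorical := by
  intro s _
  unfold Spec_time_of_day_to_categorical time_of_day_to_categorical
  rw [pv_foldl, pv_alt_eq_map]
  simp
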